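-- pv_equiv track=rewrite | github.com/tudragon154203/scrapling-fastapi | .github/workflows/scripts/bots/aider/aider_review_formatter.py | normalize_spacing
-- ===== SOURCE A (Python) =====
-- def normalize_line_endings(text: str) -> str:
--     """Return ``text`` with Windows and legacy newlines replaced by ``\n``."""
--
--     return text.replace("\r\n", "\n").replace("\r", "\n")
--
-- def normalize_spacing(text: str) -> str:
--     """Collapse redundant blank lines while keeping tidy spacing around headings."""
--
--     if not text:
--         return ""
--
--     lines = normalize_line_endings(text).split("\n")
--     normalized: list[str] = []
--     just_emitted_heading = False
--
--     for raw_line in lines: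
--         line = raw_line.rstrip()
--         stripped = line.strip()
--         if stripped.startswith("### "):
--             while normalized and normalized[-1] == "":
--                 normalized.pop()
--             if normalized:
--                 normalized.append("")
--             normalized.append(stripped)
--             just_emitted_heading = True
--             continue
--
--         if not stripped:
--             if normalized and normalized[-1] == "":
--                 continue
--             normalized.append("")
--             just_emitted_heading = False
--             continue
--
--         if just_emitted_heading:
--             if not normalized or normalized[-1] != "":
--                 normalized.append("")
--             just_emitted_heading = False
--
--         normalized.append(line)
--
--     while normalized and normalized[-1] == "":
--         normalized.pop()
--
--     return "\n".join(normalized)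
-- ===== SOURCE B (Python) =====
-- def normalize_spacing(text: str) -> str:
--     """Collapse redundant blank lines while keeping tidy spacing around headings.
--
--     Two-pass re-implementation: pass 1 classifies the lines and cuts them into
--     heading-separated groups (collapsing blank runs inside each group); pass 2
--     assembles the groups with exactly one blank line around each heading.
--     """
--
--     if not text:
--         return ""
--
--     # Pass 1: classify each line; collect headings and the line groups between them.
--     headings: list[str] = []
--     groups: list[list[str]] = [[]]
--     for raw in text.replace("\r\n", "\n").replace("\r", "\n").split("\n"):
--         line = raw.rstrip()
--         stripped = line.strip()
--         if stripped.startswith("### "):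
--             headings.append(stripped)
--             groups.append([])
--         elif stripped:
--             groups[-1].append(line)
--         elif not (groups[-1] and groups[-1][-1] == ""):
--             groups[-1].append("")
--
--     # Pass 2: emit the leading group (trailing blanks dropped), then each heading
--     # preceded by one blank line (unless nothing emitted yet) and followed by one
--     # blank line when its group still has content after trimming.
--     def trim_end(seg):
--         while seg and seg[-1] == "":
--             seg = seg[:-1]
--         return seg
--
--     def trim_start(seg):
--         while seg and seg[0] == "":
--             seg = seg[1:]
--         return seg
--
--     out = trim_end(groups[0])
--     for heading, group in zip(headings, groups[1:]):
--         if out: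
--             out = out + [""]
--         out = out + [heading]
--         body = trim_start(trim_end(group))
--         if body:
--             out = out + [""] + body
--     return "\n".join(out)
-- ===== Notes on version B (the rewrite author's own statement) =====
-- stated objective: alternative
-- what changed: Replaces A's single stateful pass (one output list with pop-backs plus a just-emitted-heading flag) by two passes: pass 1 classifies the lines into heading-separated groups, collapsing blank runs; pass 2 assembles the groups, inserting exactly one blank line around each heading and trimming each group.
import Mathlib
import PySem

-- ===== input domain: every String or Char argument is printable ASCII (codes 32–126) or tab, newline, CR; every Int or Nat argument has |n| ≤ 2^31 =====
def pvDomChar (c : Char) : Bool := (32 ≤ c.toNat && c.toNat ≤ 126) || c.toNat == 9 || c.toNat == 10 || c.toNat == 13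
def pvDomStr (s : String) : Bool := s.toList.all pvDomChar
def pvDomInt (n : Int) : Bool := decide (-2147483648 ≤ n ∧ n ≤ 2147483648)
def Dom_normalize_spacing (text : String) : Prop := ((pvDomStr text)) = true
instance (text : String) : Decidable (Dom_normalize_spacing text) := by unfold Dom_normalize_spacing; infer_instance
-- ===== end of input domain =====

-- B replaces A's single stateful pass (pop-backs + a just-emitted-heading flag) by two passes:
-- classify lines into heading-separated groups, then assemble with one blank line around each
-- heading; same cost, different decomposition. Return-value equivalence is proved for all inputs.

-- ===== PORT A =====
def normalize_line_endings (text : String) : String :=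
  PySem.Str.replace (PySem.Str.replace text "\r\n" "\n") "\r" "\n"

-- 'while normalized and normalized[-1] == "": normalized.pop()'  (drop trailing "" entries)
def nsPopBlanksA (l : List String) : List String :=
  (l.reverse.dropWhile (fun x => x == "")).reverse

def nsStepA (st : List String × Bool) (raw_line : String) : List String × Bool :=
  let line := PySem.Str.rstrip raw_line
  let stripped := PySem.Str.strip line
  if PySem.Str.startswith stripped "### " then
    let n := nsPopBlanksA st.1
    ((if n ≠ [] then n ++ [""] else n) ++ [stripped], true)
  else if stripped = "" then
    if st.1.getLast? = some "" then st
    else (st.1 ++ [""], false)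
  else
    let n1 := if st.2 then (if st.1.getLast? = some "" then st.1 else st.1 ++ [""]) else st.1
    (n1 ++ [line], false)

def normalize_spacing (text : String) : String :=
  if text = "" then ""
  else
    -- sep "\n" is non-empty, so split? is always `some` (Python raises only on sep = "")
    let lines := (PySem.Str.split? (normalize_line_endings text) "\n").getD []
    let st := lines.foldl nsStepA ([], false)
    PySem.Str.join "\n" (nsPopBlanksA st.1)

-- ===== PORT B =====
-- groups[-1].append(x)
def nsAppendLast (gs : List (List String)) (x : String) : List (List String) :=
  match gs with
  | [] => [[x]]
  | [g] => [g ++ [x]]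
  | g :: rest => g :: nsAppendLast rest x

-- pass 1: classify one line, extending (headings, groups)
def nsClassify (st : List String × List (List String)) (raw : String) :
    List String × List (List String) :=
  let line := PySem.Str.rstrip raw
  let stripped := PySem.Str.strip line
  if PySem.Str.startswith stripped "### " then
    (st.1 ++ [stripped], st.2 ++ [[]])
  else if stripped ≠ "" then
    (st.1, nsAppendLast st.2 line)
  else if (st.2.getLast?.getD []).getLast? = some "" then st
  else (st.1, nsAppendLast st.2 "")

-- 'while seg and seg[-1] == "": seg = seg[:-1]'
def nsTrimEnd (seg : List String) : List String :=
  (seg.reverse.dropWhile (fun x => x == "")).reverse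

-- 'while seg and seg[0] == "": seg = seg[1:]'
def nsTrimStart (seg : List String) : List String :=
  seg.dropWhile (fun x => x == "")

-- pass 2: emit one heading and its (trimmed) group
def nsEmit (out : List String) (hg : String × List String) : List String :=
  let out1 := if out ≠ [] then out ++ [""] else out
  let out2 := out1 ++ [hg.1]
  let body := nsTrimStart (nsTrimEnd hg.2)
  if body ≠ [] then out2 ++ [""] ++ body else out2

def normalize_spacing_alt (text : String) : String :=
  if text = "" then ""
  else
    -- sep "\n" is non-empty, so split? is always `some`
    let st := ((PySem.Str.split?
        (PySem.Str.replace (PySem.Str.replace text "\r\n" "\n") "\r" "\n") "\n").getD []).foldl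
        nsClassify ([], [[]])
    let out := (st.1.zip st.2.tail).foldl nsEmit (nsTrimEnd (st.2.headD []))
    PySem.Str.join "\n" out

-- ===== PRECONDITION & SPEC =====
def Spec_normalize_spacing (text : String) (out : String) : Prop := out = normalize_spacing_alt text
instance (text : String) (out : String) : Decidable (Spec_normalize_spacing text out) := by unfold Spec_normalize_spacing; infer_instance

-- ===== CLAIM (what is proved, stated in full; the proofs are below) =====
def Claim_equal_normalize_spacing : Prop := ∀ (text : String), Dom_normalize_spacing text → Spec_normalize_spacing text (normalize_spacing text)

-- ===== LEMMAS AND PROOFS =====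

def nsLastGroup (gs : List (List String)) : List String := (gs.getLast?).getD []

-- the contribution of the still-open last group to A's running list, one blank after the heading
def nsLastContrib (g : List String) : List String :=
  if g = [] then [] else if g.head? = some "" then g else "" :: g

-- the contribution of a closed group: trimmed on both sides, one blank before it if non-empty
def nsBodyC (g : List String) : List String :=
  if nsTrimStart (nsTrimEnd g) = [] then [] else "" :: nsTrimStart (nsTrimEnd g)

def nsMidPairs : List (String × List String) → List String
  | [] => []
  | [p] => p.1 :: nsLastContrib p.2
  | p :: q :: ps => p.1 :: (nsBodyC p.2 ++ [""] ++ nsMidPairs (q :: ps))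

def nsClosedPairs : List (String × List String) → List String
  | [] => []
  | [p] => p.1 :: nsBodyC p.2
  | p :: q :: ps => p.1 :: (nsBodyC p.2 ++ [""] ++ nsClosedPairs (q :: ps))

def nsBase (g0 : List String) : List String :=
  if nsTrimEnd g0 = [] then [] else nsTrimEnd g0 ++ [""]

-- A's running list, expressed from B's pass-1 state
def nsAsmMid (hs : List String) (gs : List (List String)) : List String :=
  if hs.zip gs.tail = [] then gs.headD []
  else nsBase (gs.headD []) ++ nsMidPairs (hs.zip gs.tail)

-- no two blank lines at the front of a group (pass 1 collapses blank runs)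
def nsNoLead2 (g : List String) : Prop := g.head? = some "" → g.tail.head? ≠ some ""

def nsInv (n : List String) (f : Bool) (hs : List String) (gs : List (List String)) : Prop :=
  (∃ g0 rest, gs = g0 :: rest ∧ rest.length = hs.length) ∧
  (∀ h ∈ hs, h ≠ "") ∧
  nsNoLead2 (nsLastGroup gs) ∧
  (f = true ↔ (hs ≠ [] ∧ nsLastGroup gs = [])) ∧
  n = nsAsmMid hs gs

lemma nsPop_eq (l : List String) : nsPopBlanksA l = nsTrimEnd l := rfl

lemma nsTrimEnd_append_of_nil {ys : List String} (h : nsTrimEnd ys = [])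
    (xs : List String) : nsTrimEnd (xs ++ ys) = nsTrimEnd xs := by
  have h' : ys.reverse.dropWhile (fun x => x == "") = [] := by
    simpa [nsTrimEnd] using h
  simp [nsTrimEnd, List.reverse_append, List.dropWhile_append, h']

lemma nsTrimEnd_append_of_ne {ys : List String} (h : nsTrimEnd ys ≠ [])
    (xs : List String) : nsTrimEnd (xs ++ ys) = xs ++ nsTrimEnd ys := by
  have h' : ¬ (ys.reverse.dropWhile (fun x => x == "")).isEmpty = true := by
    simp only [List.isEmpty_iff]
    intro hc
    exact h (by simp [nsTrimEnd, hc])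
  simp [nsTrimEnd, List.reverse_append, List.dropWhile_append, h']

lemma nsTrimEnd_eq_nil_iff {l : List String} : nsTrimEnd l = [] ↔ ∀ x ∈ l, x = "" := by
  simp [nsTrimEnd, List.dropWhile_eq_nil_iff]

lemma nsTrimEnd_singleton_ne {y : String} (h : y ≠ "") : nsTrimEnd [y] = [y] := by
  simp [nsTrimEnd, h]

lemma nsTrimEnd_prefix (l : List String) : nsTrimEnd l <+: l := by
  have h := List.dropWhile_suffix (l := l.reverse) (fun x => x == "")
  have := List.reverse_prefix.mpr h
  simpa [nsTrimEnd] using this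

lemma nsTrimEnd_head? {l : List String} (h : nsTrimEnd l ≠ []) :
    (nsTrimEnd l).head? = l.head? := by
  obtain ⟨t, ht⟩ := nsTrimEnd_prefix l
  cases hE : nsTrimEnd l with
  | nil => exact absurd hE h
  | cons a u => rw [← ht, hE]; simp

lemma nsTrimStart_of_head {l : List String} (h : l.head? ≠ some "") : nsTrimStart l = l := by
  cases l with
  | nil => rfl
  | cons a t =>
      have ha : a ≠ "" := by simpa using h
      simp [nsTrimStart, ha]

lemma nsLastContrib_snoc_blank (g : List String) :
    nsLastContrib (g ++ [""]) = nsLastContrib g ++ [""] := by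
  cases g with
  | nil => simp [nsLastContrib]
  | cons a t => by_cases ha : a = "" <;> simp [nsLastContrib, ha]

lemma nsLastContrib_snoc_of_ne_nil {g : List String} (h : g ≠ []) (y : String) :
    nsLastContrib (g ++ [y]) = nsLastContrib g ++ [y] := by
  cases g with
  | nil => exact absurd rfl h
  | cons a t => by_cases ha : a = "" <;> simp [nsLastContrib, ha]

lemma nsLastContrib_getLast? {g : List String} (h : g ≠ []) :
    (nsLastContrib g).getLast? = g.getLast? := by
  unfold nsLastContrib
  split_ifs with h1 h2
  · exact absurd h1 h
  · rfl
  · show (([""] : List String) ++ g).getLast? = _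
    rw [List.getLast?_append]
    cases hg : g.getLast? with
    | none => exact absurd (List.getLast?_eq_none_iff.mp hg) h
    | some a => simp

lemma nsTrimEnd_lastContrib {g : List String} (h : nsNoLead2 g) :
    nsTrimEnd (nsLastContrib g) = nsBodyC g := by
  cases g with
  | nil => simp [nsLastContrib, nsBodyC, nsTrimEnd, nsTrimStart]
  | cons a t =>
    by_cases ha : a = ""
    · subst ha
      by_cases htt : nsTrimEnd t = []
      · have ht0 : t = [] := by
          cases t with
          | nil => rfl
          | cons b u =>
            have hb : b = "" := nsTrimEnd_eq_nil_iff.mp htt b (by simp)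
            exact absurd (by simp [hb]) (h (by simp))
        subst ht0
        decide
      · have ht1 : nsTrimEnd ("" :: t) = "" :: nsTrimEnd t := by
          simpa using nsTrimEnd_append_of_ne htt [""]
        have htne : t ≠ [] := by
          intro h0; exact htt (by simp [h0, nsTrimEnd])
        obtain ⟨b, u, rfl⟩ : ∃ b u, t = b :: u := by
          cases t with
          | nil => exact absurd rfl htne
          | cons b u => exact ⟨b, u, rfl⟩
        have hb : b ≠ "" := by
          intro hb0
          exact (h (by simp)) (by simp [hb0])
        have hhead : (nsTrimEnd (b :: u)).head? = some b := by
          rw [nsTrimEnd_head? htt]; simp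
        have hts : nsTrimStart (nsTrimEnd (b :: u)) = nsTrimEnd (b :: u) :=
          nsTrimStart_of_head (by rw [hhead]; simp [hb])
        have hlc : nsLastContrib ("" :: b :: u) = "" :: b :: u := by
          simp [nsLastContrib]
        rw [hlc, ht1]
        unfold nsBodyC
        rw [ht1]
        have : nsTrimStart ("" :: nsTrimEnd (b :: u)) = nsTrimEnd (b :: u) := by
          simp [nsTrimStart]
          simpa [nsTrimStart] using hts
        rw [this, if_neg htt]
    · have hta : nsTrimEnd (a :: t) ≠ [] := by
        intro h0
        exact ha (nsTrimEnd_eq_nil_iff.mp h0 a (by simp))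
      have hlc : nsLastContrib (a :: t) = "" :: a :: t := by
        simp [nsLastContrib, ha]
      have ht1 : nsTrimEnd ("" :: a :: t) = "" :: nsTrimEnd (a :: t) := by
        simpa using nsTrimEnd_append_of_ne hta [""]
      have hhead : (nsTrimEnd (a :: t)).head? = some a := by
        rw [nsTrimEnd_head? hta]; simp
      have hts : nsTrimStart (nsTrimEnd (a :: t)) = nsTrimEnd (a :: t) :=
        nsTrimStart_of_head (by rw [hhead]; simp [ha])
      rw [hlc, ht1]
      unfold nsBodyC
      have : nsTrimStart (nsTrimEnd (a :: t)) = nsTrimEnd (a :: t) := hts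
      rw [this, if_neg hta]

lemma nsMidPairs_cons_cons (p q : String × List String) (ps : List (String × List String)) :
    nsMidPairs (p :: q :: ps) = p.1 :: (nsBodyC p.2 ++ [""] ++ nsMidPairs (q :: ps)) := rfl

lemma nsClosedPairs_cons_cons (p q : String × List String) (ps : List (String × List String)) :
    nsClosedPairs (p :: q :: ps) = p.1 :: (nsBodyC p.2 ++ [""] ++ nsClosedPairs (q :: ps)) := rfl

lemma nsMidPairs_snoc : ∀ (qs : List (String × List String)) (p : String × List String),
    nsMidPairs (qs ++ [p]) =
      (if qs = [] then [] else nsClosedPairs qs ++ [""]) ++ p.1 :: nsLastContrib p.2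
  | [], p => by simp [nsMidPairs]
  | [q], p => by simp [nsMidPairs, nsClosedPairs]
  | q :: q' :: qs, p => by
    have h1 : (q :: q' :: qs) ++ [p] = q :: q' :: (qs ++ [p]) := by simp
    rw [h1, nsMidPairs_cons_cons]
    have h2 : q' :: (qs ++ [p]) = (q' :: qs) ++ [p] := by simp
    rw [h2, nsMidPairs_snoc (q' :: qs) p, nsClosedPairs_cons_cons]
    simp

lemma nsClosedPairs_ne_nil : ∀ {ps : List (String × List String)}, ps ≠ [] → nsClosedPairs ps ≠ []
  | [], h => absurd rfl h
  | [p], _ => by simp [nsClosedPairs]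
  | p :: q :: ps, _ => by simp [nsClosedPairs]

lemma nsTrimEnd_midPairs : ∀ (ps : List (String × List String)), ps ≠ [] →
    (∀ p ∈ ps, p.1 ≠ "") → nsNoLead2 ((ps.getLast?.getD ("", [])).2) →
    nsTrimEnd (nsMidPairs ps) = nsClosedPairs ps
  | [], h, _, _ => absurd rfl h
  | [p], _, hh, hl => by
    have hl' : nsNoLead2 p.2 := by simpa using hl
    have hkey : nsTrimEnd (nsLastContrib p.2) = nsBodyC p.2 := nsTrimEnd_lastContrib hl'
    have hp1 : p.1 ≠ "" := hh p (by simp)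
    show nsTrimEnd ([p.1] ++ nsLastContrib p.2) = p.1 :: nsBodyC p.2
    by_cases hb : nsBodyC p.2 = []
    · rw [nsTrimEnd_append_of_nil (by rw [hkey, hb]) [p.1], nsTrimEnd_singleton_ne hp1, hb]
    · rw [nsTrimEnd_append_of_ne (by rw [hkey]; exact hb) [p.1], hkey]
      simp
  | p :: q :: ps, _, hh, hl => by
    have ih : nsTrimEnd (nsMidPairs (q :: ps)) = nsClosedPairs (q :: ps) := by
      refine nsTrimEnd_midPairs (q :: ps) (by simp) (fun r hr => hh r (by simp [hr])) ?_
      simpa [List.getLast?_cons_cons] using hl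
    rw [nsMidPairs_cons_cons]
    have h1 : p.1 :: (nsBodyC p.2 ++ [""] ++ nsMidPairs (q :: ps)) =
        (p.1 :: (nsBodyC p.2 ++ [""])) ++ nsMidPairs (q :: ps) := by simp
    rw [h1, nsTrimEnd_append_of_ne (by rw [ih]; exact nsClosedPairs_ne_nil (by simp)) _, ih,
        nsClosedPairs_cons_cons]
    simp

lemma nsAppendLast_cons {rest : List (List String)} (h : rest ≠ []) (g0 : List String)
    (x : String) : nsAppendLast (g0 :: rest) x = g0 :: nsAppendLast rest x := by
  cases rest with
  | nil => exact absurd rfl h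
  | cons a t => rfl

lemma nsAppendLast_snoc : ∀ (rest : List (List String)) (g : List String) (x : String),
    nsAppendLast (rest ++ [g]) x = rest ++ [g ++ [x]]
  | [], g, x => rfl
  | r :: rs, g, x => by
    rw [List.cons_append, nsAppendLast_cons (by simp) r x, nsAppendLast_snoc rs g x,
        List.cons_append]

lemma nsEmit_eq (out : List String) (p : String × List String) :
    nsEmit out p = (if out = [] then [] else out ++ [""]) ++ p.1 :: nsBodyC p.2 := by
  unfold nsEmit nsBodyC
  by_cases hb : nsTrimStart (nsTrimEnd p.2) = [] <;> by_cases ho : out = [] <;>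
    simp [hb, ho]

lemma nsEmit_ne_nil (out : List String) (p : String × List String) : nsEmit out p ≠ [] := by
  rw [nsEmit_eq]
  by_cases ho : out = [] <;> simp [ho]

lemma nsFoldEmit : ∀ (ps : List (String × List String)) (base : List String), ps ≠ [] →
    List.foldl nsEmit base ps = (if base = [] then [] else base ++ [""]) ++ nsClosedPairs ps
  | [], _, h => absurd rfl h
  | [p], base, _ => by
    simp only [List.foldl_cons, List.foldl_nil, nsEmit_eq]
    simp [nsClosedPairs]
  | p :: q :: ps, base, _ => by
    rw [List.foldl_cons, nsFoldEmit (q :: ps) (nsEmit base p) (by simp),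
        if_neg (nsEmit_ne_nil base p), nsEmit_eq, nsClosedPairs_cons_cons]
    by_cases ho : base = [] <;> simp [ho]

lemma nsLastGroup_snoc (g0 : List String) (rest : List (List String)) (g : List String) :
    nsLastGroup (g0 :: (rest ++ [g])) = g := by
  unfold nsLastGroup
  rw [show g0 :: (rest ++ [g]) = (g0 :: rest) ++ [g] by rw [List.cons_append],
      List.getLast?_concat]
  rfl

lemma nsAsmMid_nil (g0 : List String) : nsAsmMid [] [g0] = g0 := by
  simp [nsAsmMid]

lemma nsAsmMid_snoc {hs' rest'} (h : String) (g g0 : List String)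
    (Hlen : rest'.length = hs'.length) :
    nsAsmMid (hs' ++ [h]) (g0 :: (rest' ++ [g])) =
      nsBase g0 ++ nsMidPairs (hs'.zip rest' ++ [(h, g)]) := by
  unfold nsAsmMid
  have hz : (hs' ++ [h]).zip (rest' ++ [g]) = hs'.zip rest' ++ [(h, g)] :=
    List.zip_append Hlen.symm
  simp only [List.tail_cons, List.headD_cons, hz]
  rw [if_neg (by simp)]

lemma nsNoLead2_nil : nsNoLead2 [] := by simp [nsNoLead2]

lemma nsNoLead2_singleton (x : String) : nsNoLead2 [x] := by simp [nsNoLead2]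

lemma nsNoLead2_snoc_blank {g : List String} (h1 : nsNoLead2 g)
    (h2 : g.getLast? ≠ some "") : nsNoLead2 (g ++ [""]) := by
  match g with
  | [] => exact nsNoLead2_singleton ""
  | [a] =>
    have ha : a ≠ "" := by simpa using h2
    intro hx
    exact absurd (by simpa using hx) ha
  | a :: b :: t =>
    intro hx hy
    exact h1 (by simpa using hx) (by simpa using hy)

lemma nsNoLead2_snoc_ne {g : List String} (x : String) (h1 : nsNoLead2 g)
    (hx : x ≠ "") : nsNoLead2 (g ++ [x]) := by
  match g with
  | [] =>
    intro ha
    exact absurd (by simpa using ha) hx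
  | [a] =>
    intro _ hy
    exact hx (by simpa using hy)
  | a :: b :: t =>
    intro ha hy
    exact h1 (by simpa using ha) (by simpa using hy)

lemma nsStep_inv (raw : String) {n : List String} {f : Bool} {hs : List String}
    {gs : List (List String)} (H : nsInv n f hs gs) :
    nsInv (nsStepA (n, f) raw).1 (nsStepA (n, f) raw).2
      (nsClassify (hs, gs) raw).1 (nsClassify (hs, gs) raw).2 := by
  obtain ⟨⟨g0, rest, rfl, Hlen⟩, Hheads, Hlead, Hflag, rfl⟩ := H
  simp only [nsStepA, nsClassify]
  by_cases hH : PySem.Str.startswith (PySem.Str.strip (PySem.Str.rstrip raw)) "### " = true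
  · -- HEADING LINE
    have hsne : PySem.Str.strip (PySem.Str.rstrip raw) ≠ "" := by
      intro h0
      have h1 := hH
      rw [h0] at h1
      exact absurd h1 (by decide)
    rw [if_pos hH, if_pos hH, nsPop_eq]
    simp only [List.cons_append]
    rcases List.eq_nil_or_concat hs with rfl | ⟨hs', h_l, rfl⟩
    · -- no heading yet
      have hr : rest = [] := by simpa using Hlen
      subst hr
      refine ⟨⟨g0, [] ++ [[]], rfl, by simp⟩, ?_, ?_, ?_, ?_⟩
      · intro h hh
        have : h = PySem.Str.strip (PySem.Str.rstrip raw) := by simpa using hh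
        rw [this]; exact hsne
      · rw [nsLastGroup_snoc]
        exact nsNoLead2_nil
      · rw [nsLastGroup_snoc]
        simp
      · rw [nsAsmMid_nil,
            nsAsmMid_snoc (PySem.Str.strip (PySem.Str.rstrip raw)) [] g0 (by simp)]
        simp only [List.zip_nil_left, List.nil_append]
        rw [show nsMidPairs [(PySem.Str.strip (PySem.Str.rstrip raw), [])] =
              [PySem.Str.strip (PySem.Str.rstrip raw)] by simp [nsMidPairs, nsLastContrib]]
        by_cases htg : nsTrimEnd g0 = []
        · rw [if_neg (by simp [htg]), htg]
          simp [nsBase, htg]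
        · rw [if_pos (by simp [htg])]
          simp [nsBase, htg]
    · -- at least one heading already
      simp only [List.concat_eq_append] at *
      obtain ⟨rest', g_l, rfl⟩ : ∃ rest' g_l, rest = rest' ++ [g_l] := by
        rcases List.eq_nil_or_concat rest with rfl | ⟨rest', g_l, rfl⟩
        · simp at Hlen
        · exact ⟨rest', g_l, by simp⟩
      have Hlen' : rest'.length = hs'.length := by simp at Hlen; omega
      have hgl : nsLastGroup (g0 :: (rest' ++ [g_l])) = g_l := nsLastGroup_snoc _ _ _
      have Hlead' : nsNoLead2 g_l := by rwa [hgl] at Hlead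
      have hmid : nsTrimEnd (nsMidPairs (hs'.zip rest' ++ [(h_l, g_l)])) =
          nsClosedPairs (hs'.zip rest' ++ [(h_l, g_l)]) := by
        refine nsTrimEnd_midPairs _ (by simp) ?_ ?_
        · intro p hp
          rcases List.mem_append.mp hp with hp | hp
          · rcases p with ⟨a, b⟩
            exact Hheads a (List.mem_append.mpr (Or.inl (List.of_mem_zip hp).1))
          · have : p = (h_l, g_l) := by simpa using hp
            rw [this]
            exact Hheads h_l (by simp)
        · rw [List.getLast?_concat]
          simpa using Hlead'
      refine ⟨⟨g0, (rest' ++ [g_l]) ++ [[]], rfl, by simp; omega⟩, ?_, ?_, ?_, ?_⟩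
      · intro h hh
        rcases List.mem_append.mp hh with hh | hh
        · exact Hheads h hh
        · have : h = PySem.Str.strip (PySem.Str.rstrip raw) := by simpa using hh
          rw [this]; exact hsne
      · rw [nsLastGroup_snoc]
        exact nsNoLead2_nil
      · rw [nsLastGroup_snoc]
        simp
      · rw [nsAsmMid_snoc h_l g_l g0 Hlen',
            nsAsmMid_snoc (PySem.Str.strip (PySem.Str.rstrip raw)) [] g0 (by simp [Hlen']),
            show (hs' ++ [h_l]).zip (rest' ++ [g_l]) = hs'.zip rest' ++ [(h_l, g_l)] from
              List.zip_append Hlen'.symm,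
            nsTrimEnd_append_of_ne (by rw [hmid]; exact nsClosedPairs_ne_nil (by simp)) _, hmid]
        have hne : nsBase g0 ++ nsClosedPairs (hs'.zip rest' ++ [(h_l, g_l)]) ≠ [] := by
          intro hc
          exact nsClosedPairs_ne_nil (ps := hs'.zip rest' ++ [(h_l, g_l)]) (by simp)
            (List.append_eq_nil_iff.mp hc).2
        rw [if_pos hne,
            nsMidPairs_snoc (hs'.zip rest' ++ [(h_l, g_l)])
              (PySem.Str.strip (PySem.Str.rstrip raw), []),
            if_neg (show ¬ (hs'.zip rest' ++ [(h_l, g_l)] = []) by simp)]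
        simp [nsLastContrib]
  · rw [if_neg hH, if_neg hH]
    by_cases hB : PySem.Str.strip (PySem.Str.rstrip raw) = ""
    · -- BLANK LINE
      have hB' : ¬ (PySem.Str.strip (PySem.Str.rstrip raw) ≠ "") := by simpa using hB
      rw [if_pos hB, if_neg hB']
      have hcond : (nsAsmMid hs (g0 :: rest)).getLast? = some "" ↔
          (nsLastGroup (g0 :: rest)).getLast? = some "" := by
        rcases List.eq_nil_or_concat hs with rfl | ⟨hs', h_l, rfl⟩
        · have hr : rest = [] := by simpa using Hlen
          subst hr
          rw [nsAsmMid_nil]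
          rfl
        · simp only [List.concat_eq_append] at *
          obtain ⟨rest', g_l, rfl⟩ : ∃ rest' g_l, rest = rest' ++ [g_l] := by
            rcases List.eq_nil_or_concat rest with rfl | ⟨rest', g_l, rfl⟩
            · simp at Hlen
            · exact ⟨rest', g_l, by simp⟩
          have Hlen' : rest'.length = hs'.length := by simp at Hlen; omega
          rw [nsAsmMid_snoc h_l g_l g0 Hlen', nsLastGroup_snoc, nsMidPairs_snoc]
          by_cases hgl : g_l = []
          · subst hgl
            have hhl : h_l ≠ "" := Hheads h_l (by simp)
            rw [show nsBase g0 ++ ((if hs'.zip rest' = [] then [] else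
                  nsClosedPairs (hs'.zip rest') ++ [""]) ++ h_l :: nsLastContrib []) =
                (nsBase g0 ++ (if hs'.zip rest' = [] then [] else
                  nsClosedPairs (hs'.zip rest') ++ [""])) ++ [h_l] by simp [nsLastContrib],
                List.getLast?_concat]
            simp [hhl]
          · have h12 : (nsLastContrib g_l).getLast? = g_l.getLast? := nsLastContrib_getLast? hgl
            rw [show nsBase g0 ++ ((if hs'.zip rest' = [] then [] else
                  nsClosedPairs (hs'.zip rest') ++ [""]) ++ h_l :: nsLastContrib g_l) =
                (nsBase g0 ++ (if hs'.zip rest' = [] then [] else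
                  nsClosedPairs (hs'.zip rest') ++ [""]) ++ [h_l]) ++ nsLastContrib g_l by simp,
                List.getLast?_append, h12]
            obtain ⟨a, ha⟩ : ∃ a, g_l.getLast? = some a := by
              cases hgg : g_l.getLast? with
              | none => exact absurd (List.getLast?_eq_none_iff.mp hgg) hgl
              | some a => exact ⟨a, rfl⟩
            rw [ha]
            simp
      by_cases hskip : ((g0 :: rest).getLast?.getD []).getLast? = some ""
      · have hskipA : (nsAsmMid hs (g0 :: rest)).getLast? = some "" := hcond.mpr hskip
        rw [if_pos hskipA, if_pos hskip]
        exact ⟨⟨g0, rest, rfl, Hlen⟩, Hheads, Hlead, Hflag, rfl⟩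
      · have hskipA : ¬ (nsAsmMid hs (g0 :: rest)).getLast? = some "" :=
          fun hc => hskip (hcond.mp hc)
        rw [if_neg hskipA, if_neg hskip]
        rcases List.eq_nil_or_concat hs with rfl | ⟨hs', h_l, rfl⟩
        · have hr : rest = [] := by simpa using Hlen
          subst hr
          have hsk0 : g0.getLast? ≠ some "" := hskip
          have happ : nsAppendLast [g0] "" = [g0 ++ [""]] := rfl
          rw [happ]
          refine ⟨⟨g0 ++ [""], [], rfl, by simp⟩, Hheads, ?_, by simp [nsLastGroup], ?_⟩
          · show nsNoLead2 (nsLastGroup [g0 ++ [""]])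
            rw [show nsLastGroup [g0 ++ [""]] = g0 ++ [""] from rfl]
            exact nsNoLead2_snoc_blank (by rwa [show nsLastGroup [g0] = g0 from rfl] at Hlead) hsk0
          · rw [nsAsmMid_nil, nsAsmMid_nil]
        · simp only [List.concat_eq_append] at *
          obtain ⟨rest', g_l, rfl⟩ : ∃ rest' g_l, rest = rest' ++ [g_l] := by
            rcases List.eq_nil_or_concat rest with rfl | ⟨rest', g_l, rfl⟩
            · simp at Hlen
            · exact ⟨rest', g_l, by simp⟩
          have Hlen' : rest'.length = hs'.length := by simp at Hlen; omega
          rw [nsLastGroup_snoc] at Hlead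
          have hskg : g_l.getLast? ≠ some "" := by
            intro hc
            apply hskip
            rw [show ((g0 :: (rest' ++ [g_l])).getLast?.getD []) =
                nsLastGroup (g0 :: (rest' ++ [g_l])) from rfl, nsLastGroup_snoc]
            exact hc
          have happ : nsAppendLast (g0 :: (rest' ++ [g_l])) "" =
              g0 :: (rest' ++ [g_l ++ [""]]) := by
            rw [nsAppendLast_cons (by simp) g0, nsAppendLast_snoc]
          rw [happ]
          refine ⟨⟨g0, rest' ++ [g_l ++ [""]], rfl, by simpa using Hlen⟩, Hheads, ?_, ?_, ?_⟩
          · rw [nsLastGroup_snoc]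
            exact nsNoLead2_snoc_blank Hlead hskg
          · rw [nsLastGroup_snoc]
            simp
          · rw [nsAsmMid_snoc h_l g_l g0 Hlen', nsAsmMid_snoc h_l (g_l ++ [""]) g0 Hlen',
                nsMidPairs_snoc, nsMidPairs_snoc, nsLastContrib_snoc_blank]
            simp
    · -- NORMAL LINE
      have hBpos : PySem.Str.strip (PySem.Str.rstrip raw) ≠ "" := hB
      rw [if_neg hB, if_pos hBpos]
      have hlne : PySem.Str.rstrip raw ≠ "" := by
        intro h0
        rw [h0] at hB
        exact hB (by decide)
      rcases List.eq_nil_or_concat hs with rfl | ⟨hs', h_l, rfl⟩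
      · have hr : rest = [] := by simpa using Hlen
        subst hr
        have hf : f = false := by
          cases f with
          | false => rfl
          | true => exact absurd (Hflag.mp rfl).1 (by simp)
        subst hf
        have hnot : ¬ (false = true) := by simp
        rw [if_neg hnot]
        have happ : nsAppendLast [g0] (PySem.Str.rstrip raw) =
            [g0 ++ [PySem.Str.rstrip raw]] := rfl
        rw [happ]
        refine ⟨⟨g0 ++ [PySem.Str.rstrip raw], [], rfl, by simp⟩, Hheads, ?_,
          by simp [nsLastGroup], ?_⟩
        · show nsNoLead2 (nsLastGroup [g0 ++ [PySem.Str.rstrip raw]])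
          rw [show nsLastGroup [g0 ++ [PySem.Str.rstrip raw]] = g0 ++ [PySem.Str.rstrip raw]
              from rfl]
          exact nsNoLead2_snoc_ne _ (by rwa [show nsLastGroup [g0] = g0 from rfl] at Hlead) hlne
        · rw [nsAsmMid_nil, nsAsmMid_nil]
      · simp only [List.concat_eq_append] at *
        obtain ⟨rest', g_l, rfl⟩ : ∃ rest' g_l, rest = rest' ++ [g_l] := by
          rcases List.eq_nil_or_concat rest with rfl | ⟨rest', g_l, rfl⟩
          · simp at Hlen
          · exact ⟨rest', g_l, by simp⟩
        have Hlen' : rest'.length = hs'.length := by simp at Hlen; omega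
        rw [nsLastGroup_snoc] at Hlead Hflag
        have happ : nsAppendLast (g0 :: (rest' ++ [g_l])) (PySem.Str.rstrip raw) =
            g0 :: (rest' ++ [g_l ++ [PySem.Str.rstrip raw]]) := by
          rw [nsAppendLast_cons (by simp) g0, nsAppendLast_snoc]
        rw [happ]
        by_cases hf : f = true
        · -- just emitted a heading: the open group is empty
          have hgl : g_l = [] := (Hflag.mp hf).2
          subst hgl
          subst hf
          have hhl : h_l ≠ "" := Hheads h_l (by simp)
          have hn : nsAsmMid (hs' ++ [h_l]) (g0 :: (rest' ++ [[]])) =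
              (nsBase g0 ++ (if hs'.zip rest' = [] then [] else
                nsClosedPairs (hs'.zip rest') ++ [""])) ++ [h_l] := by
            rw [nsAsmMid_snoc h_l [] g0 Hlen', nsMidPairs_snoc]
            simp [nsLastContrib]
          have hlast : ¬ ((nsAsmMid (hs' ++ [h_l]) (g0 :: (rest' ++ [[]]))).getLast? = some "") := by
            rw [hn, List.getLast?_concat]
            simp [hhl]
          rw [if_pos rfl, if_neg hlast]
          refine ⟨⟨g0, rest' ++ [[] ++ [PySem.Str.rstrip raw]], rfl, by simpa using Hlen⟩,
            Hheads, ?_, ?_, ?_⟩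
          · rw [nsLastGroup_snoc]
            intro hx
            exact absurd (by simpa using hx) hlne
          · rw [nsLastGroup_snoc]
            simp
          · rw [hn, nsAsmMid_snoc h_l ([] ++ [PySem.Str.rstrip raw]) g0 Hlen', nsMidPairs_snoc]
            rw [show nsLastContrib ([] ++ [PySem.Str.rstrip raw]) =
                ["", PySem.Str.rstrip raw] by simp [nsLastContrib, hlne]]
            simp
        · -- inside a group: the open group is non-empty
          have hf0 : f = false := by
            cases f with
            | false => rfl
            | true => exact absurd rfl hf
          subst hf0
          have hgl : g_l ≠ [] := by
            intro h0
            have : (false : Bool) = true := Hflag.mpr ⟨by simp, h0⟩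
            simp at this
          have hnot : ¬ (false = true) := by simp
          rw [if_neg hnot]
          refine ⟨⟨g0, rest' ++ [g_l ++ [PySem.Str.rstrip raw]], rfl, by simpa using Hlen⟩,
            Hheads, ?_, ?_, ?_⟩
          · rw [nsLastGroup_snoc]
            exact nsNoLead2_snoc_ne _ Hlead hlne
          · rw [nsLastGroup_snoc]
            simp [hgl]
          · rw [nsAsmMid_snoc h_l g_l g0 Hlen',
                nsAsmMid_snoc h_l (g_l ++ [PySem.Str.rstrip raw]) g0 Hlen',
                nsMidPairs_snoc, nsMidPairs_snoc, nsLastContrib_snoc_of_ne_nil hgl]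
            simp

lemma nsFold_inv : ∀ (L : List String) {n : List String} {f : Bool} {hs : List String}
    {gs : List (List String)}, nsInv n f hs gs →
    nsInv (L.foldl nsStepA (n, f)).1 (L.foldl nsStepA (n, f)).2
      (L.foldl nsClassify (hs, gs)).1 (L.foldl nsClassify (hs, gs)).2
  | [], _, _, _, _, H => H
  | raw :: L, n, f, hs, gs, H => by
    have H' := nsStep_inv raw H
    simpa using nsFold_inv L H'

lemma nsFinal {n : List String} {f : Bool} {hs : List String} {gs : List (List String)}
    (H : nsInv n f hs gs) :
    nsTrimEnd n = (hs.zip gs.tail).foldl nsEmit (nsTrimEnd (gs.headD [])) := by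
  obtain ⟨⟨g0, rest, rfl, Hlen⟩, Hheads, Hlead, Hflag, rfl⟩ := H
  rcases List.eq_nil_or_concat hs with rfl | ⟨hs', h_l, rfl⟩
  · have hr : rest = [] := by simpa using Hlen
    subst hr
    rw [nsAsmMid_nil]
    simp
  · simp only [List.concat_eq_append] at *
    obtain ⟨rest', g_l, rfl⟩ : ∃ rest' g_l, rest = rest' ++ [g_l] := by
      rcases List.eq_nil_or_concat rest with rfl | ⟨rest', g_l, rfl⟩
      · simp at Hlen
      · exact ⟨rest', g_l, by simp⟩
    have Hlen' : rest'.length = hs'.length := by simp at Hlen; omega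
    rw [nsLastGroup_snoc] at Hlead
    have hmid : nsTrimEnd (nsMidPairs (hs'.zip rest' ++ [(h_l, g_l)])) =
        nsClosedPairs (hs'.zip rest' ++ [(h_l, g_l)]) := by
      refine nsTrimEnd_midPairs _ (by simp) ?_ ?_
      · intro p hp
        rcases List.mem_append.mp hp with hp | hp
        · rcases p with ⟨a, b⟩
          exact Hheads a (List.mem_append.mpr (Or.inl (List.of_mem_zip hp).1))
        · have : p = (h_l, g_l) := by simpa using hp
          rw [this]
          exact Hheads h_l (by simp)
      · rw [List.getLast?_concat]
        simpa using Hlead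
    rw [nsAsmMid_snoc h_l g_l g0 Hlen',
        nsTrimEnd_append_of_ne (by rw [hmid]; exact nsClosedPairs_ne_nil (by simp)) _, hmid]
    have hz : (hs' ++ [h_l]).zip ((g0 :: (rest' ++ [g_l])).tail) =
        hs'.zip rest' ++ [(h_l, g_l)] := by
      rw [List.tail_cons]
      exact List.zip_append Hlen'.symm
    rw [hz, nsFoldEmit _ _ (by simp)]
    simp only [List.headD_cons]
    unfold nsBase
    rfl

-- ===== VERDICT (by name: the statement is the Claim_ definition above) =====
theorem normalize_spacing_spec : Claim_equal_normalize_spacing := by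
  unfold Claim_equal_normalize_spacing Spec_normalize_spacing
  intro text _
  unfold normalize_spacing normalize_spacing_alt normalize_line_endings
  by_cases ht : text = ""
  · simp [ht]
  · rw [if_neg ht, if_neg ht]
    have H0 : nsInv [] false [] [[]] := by
      refine ⟨⟨[], [], rfl, rfl⟩, by simp, ?_, by simp [nsLastGroup], by simp [nsAsmMid]⟩
      simp [nsNoLead2, nsLastGroup]
    have H := nsFold_inv ((PySem.Str.split?
      (PySem.Str.replace (PySem.Str.replace text "\r\n" "\n") "\r" "\n") "\n").getD []) H0
    have hfin := nsFinal H
    show PySem.Str.join "\n" (nsPopBlanksA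
        (List.foldl nsStepA ([], false) ((PySem.Str.split?
          (PySem.Str.replace (PySem.Str.replace text "\r\n" "\n") "\r" "\n") "\n").getD [])).1) =
      PySem.Str.join "\n" (((List.foldl nsClassify ([], [[]]) ((PySem.Str.split?
          (PySem.Str.replace (PySem.Str.replace text "\r\n" "\n") "\r" "\n") "\n").getD [])).1.zip
        (List.foldl nsClassify ([], [[]]) ((PySem.Str.split?
          (PySem.Str.replace (PySem.Str.replace text "\r\n" "\n") "\r" "\n") "\n").getD [])).2.tail).foldl
        nsEmit (nsTrimEnd ((List.foldl nsClassify ([], [[]]) ((PySem.Str.split?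
          (PySem.Str.replace (PySem.Str.replace text "\r\n" "\n") "\r" "\n") "\n").getD [])).2.headD [])))
    rw [nsPop_eq]
    exact congrArg (PySem.Str.join "\n") hfin
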